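-- pv_equiv track=rewrite | github.com/nguyenlam123/advent_of_code_2020 | day_9/encrypt_weak/__init__.py | get_cont_sets
-- ===== SOURCE A (Python) =====
-- def get_cont_sets(cand_cont_set_sort):
--   islands = []
--   islands.append([])
--   curr_island = 0
--   curr_pair = cand_cont_set_sort[0]
--   islands[curr_island].append(curr_pair)
--   idx = 1
--
--   while idx < len(cand_cont_set_sort):
--     next_pair = cand_cont_set_sort[idx]
--
--     if curr_pair[0] + 1 != next_pair[0]:
--       next_island = []
--       next_island.append(next_pair)
--       islands.append(next_island)
--       curr_island += 1
--     else:
--       islands[curr_island].append(next_pair)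
--
--     curr_pair = next_pair
--     idx += 1
--
--   return islands
-- ===== SOURCE B (Python) =====
-- def get_cont_sets(cand_cont_set_sort):
--   # Recursive span decomposition: peel off the maximal continuous run, recurse on the rest.
--   def run(prev, rest):
--     if rest and rest[0][0] == prev[0] + 1:
--       grp, tail = run(rest[0], rest[1:])
--       return [rest[0]] + grp, tail
--     return [], rest
--
--   head = cand_cont_set_sort[0]
--   grp, tail = run(head, cand_cont_set_sort[1:])
--   return [[head] + grp] + (get_cont_sets(tail) if tail else [])
-- ===== Notes on version B (the rewrite author's own statement) =====
-- stated objective: alternative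
-- what changed: Replaces the indexed while-loop that mutates a current-island pointer into a growing islands list with a recursive span decomposition that peels off the maximal continuous run and recurses on the remainder.
import Mathlib
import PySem

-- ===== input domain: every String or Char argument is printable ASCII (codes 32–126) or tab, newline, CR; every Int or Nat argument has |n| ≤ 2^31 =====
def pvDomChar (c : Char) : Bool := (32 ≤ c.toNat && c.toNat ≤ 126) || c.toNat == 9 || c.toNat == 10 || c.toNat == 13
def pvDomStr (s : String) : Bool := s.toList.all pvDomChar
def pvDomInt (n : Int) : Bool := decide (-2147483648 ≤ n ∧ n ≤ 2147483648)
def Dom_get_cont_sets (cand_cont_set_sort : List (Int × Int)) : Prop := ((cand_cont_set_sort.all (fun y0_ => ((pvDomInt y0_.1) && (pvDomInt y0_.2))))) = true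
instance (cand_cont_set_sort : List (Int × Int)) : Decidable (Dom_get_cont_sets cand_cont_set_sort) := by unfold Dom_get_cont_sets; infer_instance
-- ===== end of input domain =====

-- B replaces A's indexed while-loop over a mutable islands list with a recursive
-- maximal-run decomposition (alternative structure, same O(n) cost); return-value
-- equivalence is proved on nonempty lists (A raises IndexError on []).

-- ===== PORT A =====
-- islands[curr_island].append(next_pair): curr_island is always the last island
def pvAppendLast (islands : List (List (Int × Int))) (p : Int × Int) : List (List (Int × Int)) :=
  match islands with
  | [] => []
  | [l] => [l ++ [p]]
  | l :: rest => l :: pvAppendLast rest p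

-- the while loop: 'rest' is the suffix cand_cont_set_sort[idx:]
def pvAWhile (rest : List (Int × Int)) (islands : List (List (Int × Int))) (curr_pair : Int × Int) : List (List (Int × Int)) :=
  match rest with
  | [] => islands
  | next_pair :: rs =>
    if curr_pair.1 + 1 ≠ next_pair.1 then
      pvAWhile rs (islands ++ [[next_pair]]) next_pair
    else
      pvAWhile rs (pvAppendLast islands next_pair) next_pair

def get_cont_sets (cand_cont_set_sort : List (Int × Int)) : List (List (Int × Int)) :=
  match cand_cont_set_sort with
  | [] => []  -- Python raises IndexError here (excluded by Pre_)
  | h :: t => pvAWhile t [[h]] h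

-- ===== PORT B =====
-- run(prev, rest): the maximal continuous run following prev, and the tail
def pvRun (prev : Int × Int) : List (Int × Int) → List (Int × Int) × List (Int × Int)
  | [] => ([], [])
  | p :: rest =>
    if p.1 == prev.1 + 1 then
      let (grp, tail) := pvRun p rest
      (p :: grp, tail)
    else ([], p :: rest)

theorem pvRun_tail_le (prev : Int × Int) (l : List (Int × Int)) :
    (pvRun prev l).2.length ≤ l.length := by
  induction l generalizing prev with
  | nil => simp [pvRun]
  | cons p rest ih =>
    simp only [pvRun]
    split
    · exact le_trans (ih p) (Nat.le_succ _)
    · exact le_refl _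

def get_cont_sets_alt (cand_cont_set_sort : List (Int × Int)) : List (List (Int × Int)) :=
  match cand_cont_set_sort with
  | [] => []  -- Python raises IndexError here (excluded by Pre_)
  | h :: t =>
    ([h] ++ (pvRun h t).1) :: (if (pvRun h t).2.isEmpty then [] else get_cont_sets_alt (pvRun h t).2)
termination_by cand_cont_set_sort.length
decreasing_by
  simp only [List.length_cons]
  exact Nat.lt_succ_of_le (pvRun_tail_le _ _)

-- ===== PRECONDITION & SPEC =====
-- Pre_ excludes only the empty list, on which Python A raises IndexError.
def Pre_get_cont_sets (cand_cont_set_sort : List (Int × Int)) : Prop := cand_cont_set_sort ≠ []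
instance (cand_cont_set_sort : List (Int × Int)) : Decidable (Pre_get_cont_sets cand_cont_set_sort) := by unfold Pre_get_cont_sets; infer_instance
def pvWitness_get_cont_sets : (List (Int × Int)) := [(1, 5), (2, 6), (4, 7)]

def Spec_get_cont_sets (cand_cont_set_sort : List (Int × Int)) (out : List (List (Int × Int))) : Prop := out = get_cont_sets_alt cand_cont_set_sort
instance (cand_cont_set_sort : List (Int × Int)) (out : List (List (Int × Int))) : Decidable (Spec_get_cont_sets cand_cont_set_sort out) := by unfold Spec_get_cont_sets; infer_instance

-- ===== CLAIM (what is proved, stated in full; the proofs are below) =====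
def Claim_equal_get_cont_sets : Prop := ∀ (cand_cont_set_sort : List (Int × Int)), Dom_get_cont_sets cand_cont_set_sort → Pre_get_cont_sets cand_cont_set_sort → Spec_get_cont_sets cand_cont_set_sort (get_cont_sets cand_cont_set_sort)

-- ===== LEMMAS AND PROOFS =====

theorem pvAppendLast_append (pre : List (List (Int × Int))) (cur : List (Int × Int)) (p : Int × Int) :
    pvAppendLast (pre ++ [cur]) p = pre ++ [cur ++ [p]] := by
  induction pre with
  | nil => simp [pvAppendLast]
  | cons l rest ih =>
    cases rest with
    | nil => simp [pvAppendLast]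
    | cons a b => simpa [pvAppendLast] using ih

theorem pvAWhile_eq (t : List (Int × Int)) (pre : List (List (Int × Int)))
    (cur : List (Int × Int)) (curr : Int × Int) :
    pvAWhile t (pre ++ [cur]) curr =
      pre ++ (cur ++ (pvRun curr t).1) ::
        (if (pvRun curr t).2.isEmpty then [] else get_cont_sets_alt (pvRun curr t).2) := by
  induction t generalizing pre cur curr with
  | nil => simp [pvAWhile, pvRun]
  | cons next rs ih =>
    by_cases h : curr.1 + 1 = next.1
    · have hb : (next.1 == curr.1 + 1) = true := by simp [h.symm]
      simp only [pvAWhile, pvRun, hb, if_true, if_neg (by simp [h] : ¬ curr.1 + 1 ≠ next.1)]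
      rw [pvAppendLast_append, ih]
      simp only [List.append_assoc, List.cons_append, List.nil_append]
    · have hb : (next.1 == curr.1 + 1) = false := by
        rw [beq_eq_false_iff_ne]; omega
      simp only [pvAWhile, pvRun, hb, if_pos (by omega : curr.1 + 1 ≠ next.1), Bool.false_eq_true, if_false]
      rw [show pre ++ [cur] ++ [[next]] = (pre ++ [cur]) ++ [[next]] by simp, ih]
      simp only [List.isEmpty_cons, Bool.false_eq_true, if_false]
      rw [get_cont_sets_alt]
      simp

-- ===== VERDICT (by name: the statement is the Claim_ definition above) =====
theorem get_cont_sets_spec : Claim_equal_get_cont_sets := by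
  intro xs _ hpre
  unfold Spec_get_cont_sets
  match xs with
  | [] => exact absurd rfl hpre
  | h :: t =>
    show pvAWhile t [[h]] h = _
    rw [show ([[h]] : List (List (Int × Int))) = [] ++ [[h]] from rfl, pvAWhile_eq]
    rw [get_cont_sets_alt]
    simp
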